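-- pv_equiv track=rewrite | github.com/tmathmeyer/SublimeGerrit | libtemplate.py | _TemplateToControlsList
-- ===== SOURCE A (Python) =====
-- import typing
--
-- class ControlEntry(typing.NamedTuple):
--   text_content: str
--   raw_text: bool
--
-- class SyntaxError(Exception):
--   def __init__(self, msg, line, col):
--     super().__init__(f'@{line}#{col}: {msg}')
--
--   @staticmethod
--   def Assert(test, msg, line, col):
--     if not test:
--       raise SyntaxError(msg, line, col)
--
-- def _TemplateToControlsList(template:str):
--   pending_text = ''
--   expecting_close_brace = False
--   is_pending_escape = False
--   column = 0
--   line = 1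
--   for character in template:
--     if character == '\n':
--       column = 0
--       line += 1
--     column += 1
--     if is_pending_escape and character == '{':
--       pending_text += '{'
--       is_pending_escape = False
--     elif is_pending_escape and character == '}':
--       pending_text += '}'
--       is_pending_escape = False
--     elif is_pending_escape:
--       pending_text += '\\'
--       pending_text += character
--       is_pending_escape = False
--     elif character == '{':
--       if pending_text:
--         yield ControlEntry(pending_text, True)
--         pending_text = ''
--       SyntaxError.Assert(not expecting_close_brace,
--         "Found `{` while expecting `}`", line, column)
--       assert not expecting_close_brace
--       expecting_close_brace = True
--     elif character == '}':
--       SyntaxError.Assert(expecting_close_brace,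
--         "Found `}` while not parsing control", line, column)
--       SyntaxError.Assert(pending_text,
--         "Found `}` with no pending control text", line, column)
--       assert expecting_close_brace
--       assert pending_text
--       yield ControlEntry(pending_text, False)
--       expecting_close_brace = False
--       pending_text = ''
--     elif character == '\\':
--       is_pending_escape = True
--     else:
--       pending_text += character
--
--   SyntaxError.Assert(not expecting_close_brace,
--     "Found `{` while expecting `}`", line, column)
--   assert not expecting_close_brace
--   if pending_text:
--     yield ControlEntry(pending_text, True)
-- ===== SOURCE B (Python) =====
-- class SyntaxError(Exception):
--   def __init__(self, msg, line, col):
--     super().__init__(f'@{line}#{col}: {msg}')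
--
-- def _pos(template, off):
--   line = template.count('\n', 0, off) + 1
--   col = off - template.rfind('\n', 0, off)
--   return line, col
--
-- def _TemplateToControlsList(template):
--   n = len(template)
--   i = 0
--   pending = ''
--   in_control = False
--   out = []
--   while i < n:
--     # jump to the next delimiter in one step
--     j = min((k for k in (template.find(c, i) for c in '{}\\') if k != -1),
--             default=n)
--     pending += template[i:j]
--     if j == n:
--       break
--     c = template[j]
--     if c == '\\':
--       if j + 1 < n:
--         nxt = template[j + 1]
--         pending += nxt if nxt in '{}' else '\\' + nxt
--       i = j + 2
--     elif c == '{':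
--       if pending:
--         out.append((pending, True))
--         pending = ''
--       if in_control:
--         raise SyntaxError('Found `{` while expecting `}`', *_pos(template, j))
--       in_control = True
--       i = j + 1
--     else:  # '}'
--       if not in_control:
--         raise SyntaxError('Found `}` while not parsing control', *_pos(template, j))
--       if not pending:
--         raise SyntaxError('Found `}` with no pending control text', *_pos(template, j))
--       out.append((pending, False))
--       pending = ''
--       in_control = False
--       i = j + 1
--   if in_control:
--     raise SyntaxError('Found `{` while expecting `}`', *_pos(template, n - 1))
--   if pending:
--     out.append((pending, True))
--   return out
-- ===== Notes on version B (the rewrite author's own statement) =====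
-- stated objective: faster
-- what changed: Replaces A's one-character-at-a-time generator state machine (which also maintains line/column per character) by an index-driven scan that jumps with str.find to the next delimiter ('{', '}', '\'), copies each run of ordinary characters into the buffer in one slice, dispatches on the delimiter consuming escaped pairs two characters at a time, and recomputes error line/column on demand with count/rfind.
import Mathlib
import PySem

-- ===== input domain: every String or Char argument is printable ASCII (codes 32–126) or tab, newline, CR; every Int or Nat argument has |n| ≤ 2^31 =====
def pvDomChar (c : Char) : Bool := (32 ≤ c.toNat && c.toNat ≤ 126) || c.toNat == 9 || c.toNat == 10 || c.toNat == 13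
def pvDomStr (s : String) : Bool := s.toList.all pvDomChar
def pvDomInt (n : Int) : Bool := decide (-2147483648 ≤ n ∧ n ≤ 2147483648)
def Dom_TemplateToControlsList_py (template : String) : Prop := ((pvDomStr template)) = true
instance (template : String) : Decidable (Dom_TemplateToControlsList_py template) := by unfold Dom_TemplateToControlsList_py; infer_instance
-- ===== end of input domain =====

-- B replaces A's one-character-at-a-time state machine by a delimiter-jumping scan that copies each
-- run of ordinary characters in one slice; same yielded values (equivalence is about the returned
-- control list; error positions are recomputed on demand and errors lie outside Pre_).

-- ===== PORT A =====
-- char-by-char state machine; pending text kept as List Char, yields accumulated in `out`.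
-- On the inputs excluded by Pre_ the Python raises SyntaxError; there the port returns the
-- entries yielded so far (unreachable under Pre_).
def goA : List Char → List Char → Bool → Bool → List (String × Bool) → List (String × Bool)
  | [], pend, exp, _esc, out =>
      if exp then out  -- SyntaxError (outside Pre_)
      else if pend ≠ [] then out ++ [(String.ofList pend, true)] else out
  | c :: rest, pend, exp, esc, out =>
      if esc && c = '{' then goA rest (pend ++ ['{']) exp false out
      else if esc && c = '}' then goA rest (pend ++ ['}']) exp false out
      else if esc then goA rest (pend ++ ['\\', c]) exp false out
      else if c = '{' then
        let out2 := if pend ≠ [] then out ++ [(String.ofList pend, true)] else out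
        if exp then out2  -- SyntaxError (outside Pre_)
        else goA rest [] true false out2
      else if c = '}' then
        if !exp then out  -- SyntaxError (outside Pre_)
        else if pend = [] then out  -- SyntaxError (outside Pre_)
        else goA rest [] false false (out ++ [(String.ofList pend, false)])
      else if c = '\\' then goA rest pend exp true out
      else goA rest (pend ++ [c]) exp esc out

def TemplateToControlsList_py (template : String) : List (String × Bool) :=
  goA template.toList [] false false []

-- ===== PORT B =====
def pvOrd (c : Char) : Bool := c ≠ '{' && c ≠ '}' && c ≠ '\\'

-- delimiter-jumping loop of Source B: takeWhile/dropWhile is the Lean rendering of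
-- `j = min(template.find(...))` plus the slice `template[i:j]` appended to the buffer in one
-- step; then dispatch on the delimiter found (or finish when there is none).
def goB : List Char → List Char → Bool → List (String × Bool) → List (String × Bool)
  | [], pend, inCtrl, out =>
      if inCtrl then out  -- SyntaxError (outside Pre_)
      else if pend ≠ [] then out ++ [(String.ofList pend, true)] else out
  | c :: s, pend, inCtrl, out =>
      if pvOrd c then  -- copy the whole ordinary run [c] ++ takeWhile in one slice
        goB (s.dropWhile pvOrd) (pend ++ c :: s.takeWhile pvOrd) inCtrl out
      else if c = '\\' then
        match s with
        | [] =>  -- trailing lone backslash: dropped, loop ends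
            if inCtrl then out  -- SyntaxError (outside Pre_)
            else if pend ≠ [] then out ++ [(String.ofList pend, true)] else out
        | d :: rest =>
            if d = '{' then goB rest (pend ++ ['{']) inCtrl out
            else if d = '}' then goB rest (pend ++ ['}']) inCtrl out
            else goB rest (pend ++ ['\\', d]) inCtrl out
      else if c = '{' then
        let out2 := if pend ≠ [] then out ++ [(String.ofList pend, true)] else out
        if inCtrl then out2  -- SyntaxError (outside Pre_)
        else goB s [] true out2
      else  -- c = '}'
        if !inCtrl then out  -- SyntaxError (outside Pre_)
        else if pend = [] then out  -- SyntaxError (outside Pre_)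
        else goB s [] false (out ++ [(String.ofList pend, false)])
termination_by s => s.length
decreasing_by
  all_goals simp
  have := List.length_dropWhile_le pvOrd s
  omega

def TemplateToControlsList_py_alt (template : String) : List (String × Bool) :=
  goB template.toList [] false []

-- ===== PRECONDITION & SPEC =====
-- Pre_ excludes exactly the inputs on which A raises SyntaxError: the well-formedness grammar —
-- unescaped braces alternate `{`…`}`, every control is non-empty, the template does not end
-- inside a control.  (Closed-form grammar over the characters; computes no output.)
def preOk : List Char → Bool → Bool → Bool
  | [], inCtrl, _ => !inCtrl
  | c :: rest, inCtrl, p =>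
      if c = '\\' then
        match rest with
        | [] => !inCtrl
        | _ :: rest' => preOk rest' inCtrl true
      else if c = '{' then !inCtrl && preOk rest true false
      else if c = '}' then inCtrl && p && preOk rest false false
      else preOk rest inCtrl true

def Pre_TemplateToControlsList_py (template : String) : Prop :=
  preOk template.toList false false = true

instance (template : String) : Decidable (Pre_TemplateToControlsList_py template) := by
  unfold Pre_TemplateToControlsList_py; infer_instance

def pvWitness_TemplateToControlsList_py : String := "a{x}"

def Spec_TemplateToControlsList_py (template : String) (out : List (String × Bool)) : Prop := out = TemplateToControlsList_py_alt template
instance (template : String) (out : List (String × Bool)) : Decidable (Spec_TemplateToControlsList_py template out) := by unfold Spec_TemplateToControlsList_py; infer_instance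

-- ===== CLAIM (what is proved, stated in full; the proofs are below) =====
def Claim_equal_TemplateToControlsList_py : Prop := ∀ (template : String), Dom_TemplateToControlsList_py template → Pre_TemplateToControlsList_py template → Spec_TemplateToControlsList_py template (TemplateToControlsList_py template)

-- ===== LEMMAS AND PROOFS =====

-- goA moves a whole run of ordinary characters into the pending buffer
theorem goA_run (s : List Char) : ∀ pend exp out,
    goA s pend exp false out
      = goA (s.dropWhile pvOrd) (pend ++ s.takeWhile pvOrd) exp false out := by
  induction s with
  | nil => simp
  | cons c s ih =>
    intro pend exp out
    by_cases hc : pvOrd c = true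
    · have h1 : c ≠ '{' := by simp [pvOrd] at hc; tauto
      have h2 : c ≠ '}' := by simp [pvOrd] at hc; tauto
      have h3 : c ≠ '\\' := by simp [pvOrd] at hc; tauto
      rw [goA]
      simp only [h1, h2, h3, List.takeWhile_cons, List.dropWhile_cons, hc, if_true,
        Bool.false_and, Bool.and_self, if_false, reduceIte]
      simpa using ih (pend ++ [c]) exp out
    · simp only [List.takeWhile_cons, List.dropWhile_cons, hc, if_false, Bool.false_eq_true,
        reduceIte, List.append_nil]

-- the ports agree on every input (error cases included: both return the entries yielded so far)
theorem goA_eq_goB_aux : ∀ (n : ℕ) (s : List Char), s.length ≤ n → ∀ pend exp out,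
    goA s pend exp false out = goB s pend exp out := by
  intro n
  induction n with
  | zero =>
    intro s hs pend exp out
    have : s = [] := by cases s <;> simp_all
    subst this
    rw [goA, goB]
  | succ n ih =>
    intro s hs pend exp out
    match s with
    | [] => rw [goA, goB]
    | c :: rest =>
      by_cases hc : pvOrd c = true
      · have h1 : c ≠ '{' := by simp [pvOrd] at hc; tauto
        have h2 : c ≠ '}' := by simp [pvOrd] at hc; tauto
        have h3 : c ≠ '\\' := by simp [pvOrd] at hc; tauto
        have hlen : (rest.dropWhile pvOrd).length ≤ n := by
          have := List.length_dropWhile_le pvOrd rest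
          simp at hs; omega
        have e1 : goA (c :: rest) pend exp false out
            = goA (rest.dropWhile pvOrd) (pend ++ c :: rest.takeWhile pvOrd) exp false out := by
          have := goA_run (c :: rest) pend exp out
          simpa [List.dropWhile_cons, List.takeWhile_cons, hc] using this
        have e3 : goB (c :: rest) pend exp out
            = goB (rest.dropWhile pvOrd) (pend ++ c :: rest.takeWhile pvOrd) exp out := by
          rw [goB.eq_def]
          simp [hc]
        rw [e1, e3]
        exact ih _ hlen _ _ _
      · rw [goA, goB.eq_def]
        by_cases h1 : c = '{'
        · subst h1
          simp only [reduceCtorEq, if_false, if_true, reduceIte, pvOrd, Bool.false_and]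
          split
          · rfl
          · exact ih rest (by simp at hs; omega) _ _ _
        · by_cases h2 : c = '}'
          · subst h2
            simp only [reduceCtorEq, if_false, if_true, reduceIte, h1, pvOrd, Bool.and_false,
              Bool.false_and]
            split
            · rfl
            · split
              · rfl
              · exact ih rest (by simp at hs; omega) _ _ _
          · have h3 : c = '\\' := by
              simp [pvOrd, h1, h2] at hc; exact hc
            subst h3
            simp only [reduceIte, reduceCtorEq, if_false, pvOrd, Bool.and_false, Bool.false_and,
              h1, h2]
            match rest with
            | [] => rw [goA]; simp [pvOrd]
            | d :: rest' =>
              rw [goA]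
              by_cases hd1 : d = '{'
              · subst hd1; simp
                exact ih rest' (by simp at hs; omega) _ _ _
              · by_cases hd2 : d = '}'
                · subst hd2; simp
                  exact ih rest' (by simp at hs; omega) _ _ _
                · simp [hd1, hd2]
                  exact ih rest' (by simp at hs; omega) _ _ _

-- ===== VERDICT (by name: the statement is the Claim_ definition above) =====
theorem TemplateToControlsList_py_spec : Claim_equal_TemplateToControlsList_py := by
  intro template _ _
  unfold Spec_TemplateToControlsList_py TemplateToControlsList_py TemplateToControlsList_py_alt
  exact goA_eq_goB_aux _ _ le_rfl _ _ _
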